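-- pv_equiv track=rewrite | github.com/joydas65/GeeksforGeeks | Second_Most_Repeated_String_In_A_Sequence.py | secFrequent
-- ===== SOURCE A (Python) =====
-- def secFrequent(arr, n):
--     # code here
--
--     d,ans,x = dict(),0,0
--
--     for i in arr:
--
--         if i in d:
--
--             d[i] += 1
--
--         else:
--
--             d[i] = 1
--
--
--         ans = max(ans, d[i])
--
--     for i in d:
--
--         if d[i] != ans and x < d[i]:
--
--             an,x = i,d[i]
--
--     return an
-- ===== SOURCE B (Python) =====
-- def secFrequent(arr, n):
--     freq = {}
--     for s in arr:
--         freq[s] = freq.get(s, 0) + 1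
--     order = sorted(freq, key=lambda k: -freq[k])  # stable: ties keep first-occurrence order
--     top = freq[order[0]]
--     return next(k for k in order if freq[k] != top)
-- ===== Notes on version B (the rewrite author's own statement) =====
-- stated objective: alternative
-- what changed: A tracks the running max while building the dict and then scans the dict keeping the best below-max count in two mutable variables; B builds a counter, stably sorts the distinct strings by descending frequency, and returns the first string in that order whose count differs from the top count.
import Mathlib
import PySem

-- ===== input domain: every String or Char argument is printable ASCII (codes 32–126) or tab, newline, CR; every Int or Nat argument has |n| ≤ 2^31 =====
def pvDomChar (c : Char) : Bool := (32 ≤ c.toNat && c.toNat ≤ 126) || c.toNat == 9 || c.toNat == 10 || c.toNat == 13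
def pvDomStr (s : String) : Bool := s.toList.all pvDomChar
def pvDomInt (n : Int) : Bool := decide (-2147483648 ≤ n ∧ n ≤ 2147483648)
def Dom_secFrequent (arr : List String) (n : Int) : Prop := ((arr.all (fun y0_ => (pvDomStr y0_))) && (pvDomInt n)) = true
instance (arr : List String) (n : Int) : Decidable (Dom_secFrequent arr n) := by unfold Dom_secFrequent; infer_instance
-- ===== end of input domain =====

-- B replaces A's running-max-while-building + best-below-max scan by: count, stably sort the distinct
-- strings by descending frequency, and return the first sorted string whose count differs from the top's
-- (alternative decomposition, not claimed faster).

-- ===== PORT A =====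
def secFrequent (arr : List String) (n : Int) : String :=
  -- d,ans,x = dict(),0,0 ; for i in arr: … ; ans = max(ans, d[i])
  let s := arr.foldl (fun (s : PySem.Dict String Int × Int) i =>
      let d' := if s.1.contains i then s.1.modify i 0 (· + 1) else s.1.insert i 1
      (d', max s.2 (d'.getD i 0))) (PySem.Dict.empty, 0)
  let d := s.1
  let ans := s.2
  -- for i in d: if d[i] != ans and x < d[i]: an,x = i,d[i]
  let r := d.keys.foldl (fun (p : Option String × Int) i =>
      if d.getD i 0 ≠ ans ∧ p.2 < d.getD i 0 then (some i, d.getD i 0) else p) (none, 0)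
  -- 'an' is an unbound local when never assigned (UnboundLocalError): Pre_ excludes that case
  r.1.getD ""

-- ===== PORT B =====
def secFrequent_alt (arr : List String) (n : Int) : String :=
  let freq : PySem.Dict String Int := arr.foldl (fun d s => d.insert s (d.getD s 0 + 1)) PySem.Dict.empty
  -- order = sorted(freq, key=lambda k: -freq[k])  (stable: ties keep insertion order)
  let order := PySem.List.sorted freq.keys (fun k => -(freq.getD k 0))
  -- order[0] raises IndexError on empty input, next(…) raises StopIteration when all counts are
  -- maximal: both cases are excluded by Pre_
  match PySem.List.pyGet? order 0 with
  | none => ""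
  | some h =>
    let top := freq.getD h 0
    (order.find? (fun k => freq.getD k 0 != top)).getD ""

-- ===== PRECONDITION & SPEC =====
-- Pre_ excludes exactly the inputs where A raises UnboundLocalError (no string with a
-- non-maximal frequency exists, e.g. the empty list or all frequencies equal); B raises there too.
def Pre_secFrequent (arr : List String) (n : Int) : Prop :=
  ∃ x ∈ arr, ∃ y ∈ arr, arr.count x ≠ arr.count y
instance (arr : List String) (n : Int) : Decidable (Pre_secFrequent arr n) := by
  unfold Pre_secFrequent; infer_instance
def pvWitness_secFrequent : List String × Int := (["a", "b", "b"], 3)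

def Spec_secFrequent (arr : List String) (n : Int) (out : String) : Prop := out = secFrequent_alt arr n
instance (arr : List String) (n : Int) (out : String) : Decidable (Spec_secFrequent arr n out) := by unfold Spec_secFrequent; infer_instance

-- ===== CLAIM (what is proved, stated in full; the proofs are below) =====
def Claim_equal_secFrequent : Prop := ∀ (arr : List String) (n : Int), Dom_secFrequent arr n → Pre_secFrequent arr n → Spec_secFrequent arr n (secFrequent arr n)

-- ===== LEMMAS AND PROOFS =====

def pvStepM (s : PySem.Dict String Int × Int) (i : String) : PySem.Dict String Int × Int :=
  let d' := s.1.modify i 0 (· + 1)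
  (d', max s.2 (d'.getD i 0))

lemma pvStepA_eq (s : PySem.Dict String Int × Int) (i : String) :
    (let d' := if s.1.contains i then s.1.modify i 0 (· + 1) else s.1.insert i 1
     (d', max s.2 (d'.getD i 0))) = pvStepM s i := by
  by_cases h : s.1.contains i = true
  · simp [h, pvStepM]
  · simp only [Bool.not_eq_true] at h
    simp [h, pvStepM, PySem.Dict.modify, PySem.Dict.getD_of_not_contains _ _ h]

lemma pvFoldA_eq_foldM (l : List String) (s : PySem.Dict String Int × Int) :
    l.foldl (fun (s : PySem.Dict String Int × Int) i =>
      let d' := if s.1.contains i then s.1.modify i 0 (· + 1) else s.1.insert i 1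
      (d', max s.2 (d'.getD i 0))) s = l.foldl pvStepM s := by
  induction l generalizing s with
  | nil => rfl
  | cons x t ih => rw [List.foldl_cons, List.foldl_cons, pvStepA_eq]; exact ih (pvStepM s x)

lemma pvFst_foldM (l : List String) (s : PySem.Dict String Int × Int) :
    (l.foldl pvStepM s).1 = l.foldl (fun d x => d.modify x 0 (· + 1)) s.1 := by
  induction l generalizing s with
  | nil => rfl
  | cons x t ih => simpa [pvStepM] using ih (pvStepM s x)

lemma pvF2 (l : List String) (s : PySem.Dict String Int × Int)
    (h : ∀ k, s.1.getD k 0 ≤ s.2) (k : String) :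
    (l.foldl pvStepM s).1.getD k 0 ≤ (l.foldl pvStepM s).2 := by
  induction l generalizing s with
  | nil => exact h k
  | cons x t ih =>
    apply ih
    intro j
    simp only [pvStepM, PySem.Dict.getD_modify]
    by_cases hj : j = x
    · simp [hj]
    · simp only [if_neg hj]
      exact le_trans (h j) (le_max_left _ _)

lemma pvF3 (l : List String) (s : PySem.Dict String Int × Int)
    (h : s.2 = 0 ∨ ∃ k, s.2 ≤ s.1.getD k 0) :
    (l.foldl pvStepM s).2 = 0 ∨ ∃ k, (l.foldl pvStepM s).2 ≤ (l.foldl pvStepM s).1.getD k 0 := by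
  induction l generalizing s with
  | nil => exact h
  | cons x t ih =>
    apply ih
    have hx : (s.1.modify x 0 (· + 1)).getD x 0 = s.1.getD x 0 + 1 :=
      PySem.Dict.getD_modify_self _ _ _ _
    rcases (by omega : s.1.getD x 0 + 1 ≤ s.2 ∨ s.2 < s.1.getD x 0 + 1) with hle | hlt
    · have hmax : max s.2 ((s.1.modify x 0 (· + 1)).getD x 0) = s.2 := by
        rw [hx]; exact max_eq_left hle
      rcases h with h0 | ⟨k, hk⟩
      · left
        show max s.2 ((s.1.modify x 0 (· + 1)).getD x 0) = 0
        rw [hmax, h0]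
      · right
        refine ⟨k, ?_⟩
        show max s.2 ((s.1.modify x 0 (· + 1)).getD x 0) ≤ (s.1.modify x 0 (· + 1)).getD k 0
        rw [hmax, PySem.Dict.getD_modify]
        by_cases hkx : k = x
        · subst hkx; simp; omega
        · simpa [hkx] using hk
    · right
      refine ⟨x, ?_⟩
      show max s.2 ((s.1.modify x 0 (· + 1)).getD x 0) ≤ (s.1.modify x 0 (· + 1)).getD x 0
      rw [hx]
      omega

def pvSeedm (f : String → Int) (M : Int) (K : List String) (x : Int) : Int :=
  K.foldl (fun a k => if f k ≠ M then max a (f k) else a) x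

lemma pvLe_seedm (f : String → Int) (M : Int) (K : List String) (x : Int) :
    x ≤ pvSeedm f M K x := by
  induction K generalizing x with
  | nil => exact le_refl x
  | cons k t ih =>
    refine le_trans ?_ (ih (if f k ≠ M then max x (f k) else x))
    split <;> simp

lemma pvSeedm_ge_of_mem (f : String → Int) (M : Int) (K : List String) (k : String)
    (hk : k ∈ K) (hne : f k ≠ M) (x : Int) : f k ≤ pvSeedm f M K x := by
  induction K generalizing x with
  | nil => cases hk
  | cons j t ih =>
    rcases List.mem_cons.mp hk with rfl | hmem
    · show f k ≤ pvSeedm f M t (if f k ≠ M then max x (f k) else x)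
      refine le_trans ?_ (pvLe_seedm f M t _)
      simp [hne]
    · exact ih hmem _

lemma pvSeedm_attained (f : String → Int) (M : Int) (K : List String) (x : Int) :
    pvSeedm f M K x = x ∨ ∃ k ∈ K, f k ≠ M ∧ pvSeedm f M K x = f k := by
  induction K generalizing x with
  | nil => exact Or.inl rfl
  | cons j t ih =>
    show pvSeedm f M t (if f j ≠ M then max x (f j) else x) = x ∨ _
    rcases ih (if f j ≠ M then max x (f j) else x) with h | ⟨k, hk, hne, he⟩
    · by_cases hj : f j = M
      · left; rw [h]; simp [hj]
      · rcases max_choice x (f j) with hm | hm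
        · left; rw [h, if_pos hj, hm]
        · right
          refine ⟨j, List.mem_cons_self, hj, ?_⟩
          show pvSeedm f M t (if f j ≠ M then max x (f j) else x) = f j
          rw [h, if_pos hj, hm]
    · exact Or.inr ⟨k, List.mem_cons_of_mem j hk, hne, he⟩

lemma pvScan (f : String → Int) (M : Int) (K : List String) (an : Option String) (x : Int) :
    (K.foldl (fun (p : Option String × Int) k =>
        if f k ≠ M ∧ p.2 < f k then (some k, f k) else p) (an, x)).1
      = if x < pvSeedm f M K x
          then K.find? (fun k => (f k != M) && (f k == pvSeedm f M K x))
          else an := by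
  induction K generalizing an x with
  | nil => simp [pvSeedm]
  | cons k t ih =>
    have hseed : pvSeedm f M (k :: t) x = pvSeedm f M t (if f k ≠ M then max x (f k) else x) := rfl
    by_cases hM : f k = M
    · -- head skipped by both the fold and find?
      have h1 : (if f k ≠ M ∧ x < f k then ((some k : Option String), f k) else (an, x)) = (an, x) := by
        simp [hM]
      show (t.foldl _ (if f k ≠ M ∧ x < f k then ((some k : Option String), f k) else (an, x))).1 = _
      rw [h1, ih, hseed]
      simp [hM]
    · by_cases hlt : x < f k
      · -- head recorded
        have h1 : (if f k ≠ M ∧ x < f k then ((some k : Option String), f k) else (an, x)) = (some k, f k) := by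
          simp [hM, hlt]
        have hs2 : pvSeedm f M (k :: t) x = pvSeedm f M t (f k) := by
          rw [hseed]; simp [hM, max_eq_right (le_of_lt hlt)]
        have hkle : f k ≤ pvSeedm f M t (f k) := pvLe_seedm f M t (f k)
        show (t.foldl _ (if f k ≠ M ∧ x < f k then ((some k : Option String), f k) else (an, x))).1 = _
        rw [h1, ih]
        rcases eq_or_lt_of_le hkle with heq | hlt2
        · -- head is the overall max: find? succeeds at the head
          rw [if_neg (by omega), hs2, List.find?_cons_of_pos (by simp [hM, ← heq]),
            if_pos (by omega)]
        · -- a strictly larger eligible value comes later: head fails the find?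
          rw [if_pos (by omega), hs2, if_pos (by omega),
            List.find?_cons_of_neg (by simp [hM]; omega)]
      · -- head eligible but not an improvement
        have h1 : (if f k ≠ M ∧ x < f k then ((some k : Option String), f k) else (an, x)) = (an, x) := by
          simp [hlt]
        have hs2 : pvSeedm f M (k :: t) x = pvSeedm f M t x := by
          have hmx : max x (f k) = x := max_eq_left (by omega)
          rw [hseed]; simp [hM, hmx]
        show (t.foldl _ (if f k ≠ M ∧ x < f k then ((some k : Option String), f k) else (an, x))).1 = _
        rw [h1, ih, hs2]
        by_cases hc : x < pvSeedm f M t x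
        · rw [if_pos hc, if_pos hc, List.find?_cons_of_neg (by simp [hM]; omega)]
        · rw [if_neg hc, if_neg hc]

lemma pvFind?_congr_mem {α : Type} (l : List α) (p q : α → Bool)
    (h : ∀ a ∈ l, p a = q a) : l.find? p = l.find? q := by
  induction l with
  | nil => rfl
  | cons a t ih =>
    rcases hpa : p a with hf | ht
    · rw [List.find?_cons_of_neg (by simp [hpa]), List.find?_cons_of_neg (by simp [← h a List.mem_cons_self, hpa]),
        ih (fun b hb => h b (List.mem_cons_of_mem a hb))]
    · rw [List.find?_cons_of_pos hpa, List.find?_cons_of_pos (by rw [← h a List.mem_cons_self]; exact hpa)]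

-- in a list whose counts are non-increasing, the first non-maximal count is the second-best count
lemma pvFindNe (f : String → Int) (M m : Int) (hmM : m ≠ M) (L : List String)
    (hpw : L.Pairwise (fun a b => f b ≤ f a))
    (hub : ∀ k ∈ L, f k ≠ M → f k ≤ m)
    (hw : ∃ w ∈ L, f w = m) :
    L.find? (fun k => f k != M) = L.find? (fun k => f k == m) := by
  induction L with
  | nil => rfl
  | cons k0 t ih =>
    rcases List.pairwise_cons.mp hpw with ⟨hhd, htl⟩
    by_cases h0 : f k0 = M
    · rw [List.find?_cons_of_neg (by simp [h0]), List.find?_cons_of_neg (by simp [h0, Ne.symm hmM])]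
      refine ih htl (fun k hk => hub k (List.mem_cons_of_mem _ hk)) ?_
      obtain ⟨w, hwl, hwm⟩ := hw
      rcases List.mem_cons.mp hwl with rfl | hwt
      · exact absurd (hwm.symm.trans h0) hmM
      · exact ⟨w, hwt, hwm⟩
    · have hk0m : f k0 = m := by
        have hle : f k0 ≤ m := hub k0 List.mem_cons_self h0
        obtain ⟨w, hwl, hwm⟩ := hw
        rcases List.mem_cons.mp hwl with rfl | hwt
        · exact hwm
        · have := hhd w hwt
          omega
      rw [List.find?_cons_of_pos (by simp [h0]), List.find?_cons_of_pos (by simp [hk0m])]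

-- inserting into a key-sorted list is stable: the elements of one key value keep their order
lemma pvFilter_insertBy (key : String → Int) (v : Int) (x : String) (l : List String)
    (hl : l.Pairwise (fun a b => key a ≤ key b)) :
    (PySem.List.insertBy (fun a b => decide (key a < key b)) x l).filter (fun a => key a == v)
      = if key x = v then l.filter (fun a => key a == v) ++ [x]
        else l.filter (fun a => key a == v) := by
  induction l with
  | nil =>
    simp only [PySem.List.insertBy, List.filter_nil]
    by_cases h : key x = v <;> simp [h]
  | cons y ys ih =>
    rcases List.pairwise_cons.mp hl with ⟨hhd, htl⟩
    show (if decide (key x < key y) = true then x :: y :: ys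
          else y :: PySem.List.insertBy (fun a b => decide (key a < key b)) x ys).filter _ = _
    by_cases hlt : key x < key y
    · rw [if_pos (by simp [hlt])]
      by_cases hxv : key x = v
      · have hnone : ∀ a ∈ y :: ys, ¬ (key a == v) = true := by
          intro a ha
          have hya : key y ≤ key a := by
            rcases List.mem_cons.mp ha with rfl | hat
            · exact le_refl _
            · exact hhd a hat
          simp; omega
        have hfe : (y :: ys).filter (fun a => key a == v) = [] :=
          List.filter_eq_nil_iff.mpr hnone
        rw [if_pos hxv, hfe, List.filter_cons_of_pos (by simp [hxv]), hfe]; rfl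
      · rw [if_neg hxv, List.filter_cons_of_neg (by simp [hxv])]
    · rw [if_neg (by simp [hlt]), List.filter_cons, List.filter_cons, ih htl]
      by_cases hxv : key x = v
      · rw [if_pos hxv, if_pos hxv]
        by_cases hyv : (key y == v) = true <;> simp [hyv]
      · rw [if_neg hxv, if_neg hxv]

-- PySem's sort is stable: filtering one key value commutes with sorting
lemma pvFilter_sorted (key : String → Int) (v : Int) (xs : List String) :
    (PySem.List.sorted xs key).filter (fun a => key a == v) = xs.filter (fun a => key a == v) := by
  induction xs using List.reverseRecOn with
  | nil => rfl
  | append_singleton ys x ih =>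
    rw [PySem.List.sorted_eq_foldl_insertBy, List.foldl_append, List.foldl_cons, List.foldl_nil,
      ← PySem.List.sorted_eq_foldl_insertBy,
      pvFilter_insertBy key v x _ (PySem.List.sorted_pairwise ys key), ih,
      List.filter_append, List.filter_cons, List.filter_nil]
    by_cases hxv : key x = v <;> simp [hxv]

-- ===== VERDICT (by name: the statement is the Claim_ definition above) =====
theorem secFrequent_spec : Claim_equal_secFrequent := by
  intro arr n _ hpre
  obtain ⟨u, hu, v, hv, huv⟩ := hpre
  show secFrequent arr n = secFrequent_alt arr n
  simp only [secFrequent, secFrequent_alt]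
  rw [pvFoldA_eq_foldM]
  simp only [PySem.Dict.foldl_insert_getD_add_one_eq_counter]
  set c : String → Int := fun k => ((arr.count k : Nat) : Int) with hc
  set K := PySem.Set.ofList arr with hK
  have dEq : (arr.foldl pvStepM (PySem.Dict.empty, 0)).1 = PySem.Dict.counter arr := by
    rw [pvFst_foldM]; exact (PySem.Dict.counter_eq_foldl arr).symm
  set M := (arr.foldl pvStepM (PySem.Dict.empty, (0 : Int))).2 with hM
  have hgetD : ∀ k, (PySem.Dict.counter arr).getD k 0 = c k := fun k => PySem.Dict.getD_counter arr k
  have hcount_le : ∀ k, c k ≤ M := by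
    intro k
    have h2 := pvF2 arr (PySem.Dict.empty, 0) (by intro j; simp [PySem.Dict.getD_empty]) k
    rwa [dEq, hgetD] at h2
  have hcu : (1 : Int) ≤ c u := by
    have := List.count_pos_iff.mpr hu
    simp only [hc]; omega
  have hcv : (1 : Int) ≤ c v := by
    have := List.count_pos_iff.mpr hv
    simp only [hc]; omega
  have hM1 : (1 : Int) ≤ M := le_trans hcu (hcount_le u)
  have hmemK : ∀ k, (1 : Int) ≤ c k → k ∈ K := by
    intro k hk1
    rw [hK, PySem.Set.mem_ofList]
    refine List.count_pos_iff.mp ?_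
    simp only [hc] at hk1; omega
  have hMex : ∃ k ∈ K, M ≤ c k := by
    rcases pvF3 arr (PySem.Dict.empty, 0) (Or.inl rfl) with h0 | ⟨k, hk⟩
    · rw [← hM] at h0; omega
    · rw [dEq, hgetD] at hk
      exact ⟨k, hmemK k (le_trans hM1 hk), hk⟩
  -- an eligible witness: a string whose count is not maximal
  have hwit : ∃ w, w ∈ K ∧ c w ≠ M ∧ (1 : Int) ≤ c w := by
    have hne : c u ≠ c v := by simp only [hc]; intro h; apply huv; omega
    rcases (by omega : c u < c v ∨ c v < c u) with h | h
    · exact ⟨u, hmemK u hcu, by have := hcount_le v; omega, hcu⟩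
    · exact ⟨v, hmemK v hcv, by have := hcount_le u; omega, hcv⟩
  obtain ⟨w, hwK, hwne, hw1⟩ := hwit
  set m := pvSeedm c M K 0 with hm
  have hm_pos : 0 < m := lt_of_lt_of_le (by omega : (0:Int) < c w) (pvSeedm_ge_of_mem c M K w hwK hwne 0)
  have hmub : ∀ k ∈ K, c k ≠ M → c k ≤ m := fun k hk hne => pvSeedm_ge_of_mem c M K k hk hne 0
  have hmatt : ∃ k ∈ K, c k ≠ M ∧ c k = m := by
    rcases pvSeedm_attained c M K 0 with h0 | ⟨k, hk, hne, he⟩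
    · rw [← hm] at h0; omega
    · exact ⟨k, hk, hne, he ▸ hm ▸ rfl⟩
  have hmM : m ≠ M := by obtain ⟨k, _, hne, he⟩ := hmatt; omega
  -- A's second loop
  rw [dEq, PySem.Dict.keys_counter]
  simp only [hgetD]
  rw [← hK]
  rw [pvScan c M K none 0, if_pos (hm ▸ hm_pos), ← hm]
  -- B's side: the sorted order
  set key : String → Int := fun k => -(c k) with hkey
  set order := PySem.List.sorted K key with horder
  have hKne : K ≠ [] := List.ne_nil_of_mem hwK
  have hone : order ≠ [] := by
    rw [horder]; intro h; exact hKne ((PySem.List.sorted_eq_nil_iff K key false).mp h)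
  obtain ⟨h0, t0, hcons⟩ := List.exists_cons_of_ne_nil hone
  have hget : PySem.List.pyGet? order 0 = some h0 := by
    rw [hcons, (by norm_num : (0 : Int) = ((0 : Nat) : Int)), PySem.List.pyGet?_natCast]; rfl
  simp only [hget]
  -- the head of the sorted order has the maximal count
  have hh0M : c h0 = M := by
    have hle : ∀ y ∈ K, key h0 ≤ key y := PySem.List.key_head_sorted_le K key (horder ▸ hcons)
    obtain ⟨k1, hk1K, hk1⟩ := hMex
    have h1 : c k1 ≤ c h0 := by have := hle k1 hk1K; simp only [hkey] at this; omega
    have h2 : c h0 ≤ M := hcount_le h0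
    omega
  -- B's find? over the sorted order finds the first count-m key of K
  have hpw : order.Pairwise (fun a b => c b ≤ c a) := by
    have := PySem.List.sorted_pairwise K key
    rw [← horder] at this
    exact this.imp (by intro a b h; simp only [hkey] at h; omega)
  have hfind : order.find? (fun k => c k != c h0) = K.find? (fun k => c k == m) := by
    rw [hh0M]
    rw [pvFindNe c M m hmM order hpw
      (fun k hk => hmub k (by rw [horder, PySem.List.mem_sorted] at hk; exact hk))
      (by obtain ⟨k, hk, hne, he⟩ := hmatt
          exact ⟨k, by rw [horder, PySem.List.mem_sorted]; exact hk, he⟩)]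
    have hcv2 : ∀ (L : List String), L.find? (fun k => c k == m) = L.find? (fun k => key k == -m) := by
      intro L
      refine pvFind?_congr_mem L _ _ (fun a _ => ?_)
      simp only [hkey]
      by_cases h : c a = m
      · simp [h]
      · simp [h]
    rw [hcv2 order, ← List.head?_filter, horder, pvFilter_sorted key (-m) K,
      List.head?_filter, ← hcv2 K]
  have hpq : ∀ k ∈ K, ((c k != M) && (c k == m)) = (c k == m) := by
    intro k _
    by_cases hck : c k = m
    · simp [hck, hmM]
    · simp [hck]
  rw [hfind, pvFind?_congr_mem K _ _ hpq]
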